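-- pv_equiv track=rewrite | github.com/ejb816/nexonix | draco-dev-journal/tools/gaps/build_chapter.py | trim_response
-- ===== SOURCE A (Python) =====
-- def trim_response(response, max_chars=2000):
--     """Trim long responses to essential content."""
--     if len(response) <= max_chars:
--         return response
--     lines = response.split('\n')
--     kept = []
--     char_count = 0
--     for line in lines:
--         if char_count + len(line) > max_chars:
--             break
--         kept.append(line)
--         char_count += len(line) + 1
--     result = '\n'.join(kept)
--     if len(result) < len(response):
--         result += '\n\n[Response trimmed for brevity.]'
--     return result
-- ===== SOURCE B (Python) =====
-- def trim_response(response, max_chars=2000):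
--     """Trim long responses to essential content."""
--     if len(response) <= max_chars:
--         return response
--     # The kept block is exactly the prefix up to the last newline at index <= max_chars.
--     cut = response.rfind('\n', 0, max(max_chars + 1, 0))
--     head = response[:cut] if cut >= 0 else ''
--     if len(head) < len(response):
--         head += '\n\n[Response trimmed for brevity.]'
--     return head
-- ===== Notes on version B (the rewrite author's own statement) =====
-- stated objective: alternative
-- what changed: Replaces A's split-into-lines / greedy accumulate-and-break loop / join pipeline by a single rfind for the last newline at index <= max_chars and one slice of the original string (no line list is ever built).
import Mathlib
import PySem

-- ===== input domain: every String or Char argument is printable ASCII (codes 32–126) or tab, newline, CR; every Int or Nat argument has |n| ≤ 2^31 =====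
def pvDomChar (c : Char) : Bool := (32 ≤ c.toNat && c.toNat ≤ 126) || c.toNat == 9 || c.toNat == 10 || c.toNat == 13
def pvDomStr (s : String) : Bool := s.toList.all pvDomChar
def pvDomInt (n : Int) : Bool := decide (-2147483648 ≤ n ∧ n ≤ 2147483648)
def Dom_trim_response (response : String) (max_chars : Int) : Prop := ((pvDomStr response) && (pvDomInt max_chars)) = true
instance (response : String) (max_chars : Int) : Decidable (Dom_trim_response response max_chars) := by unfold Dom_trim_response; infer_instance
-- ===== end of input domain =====

-- B replaces A's split/greedy-accumulate/join pipeline by a single rfind for the last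
-- newline inside the budget window and one slice; the return value is proved identical.

-- ===== PORT A =====
-- the greedy line-keeping loop of A (kept/char_count accumulator, break on overflow)
def trimLoopA (max_chars : Int) : List String → List String → Int → List String
  | [], kept, _ => kept
  | line :: ls, kept, char_count =>
    if char_count + PySem.Str.len line > max_chars then kept
    else trimLoopA max_chars ls (kept ++ [line]) (char_count + PySem.Str.len line + 1)

def trim_response (response : String) (max_chars : Int) : String :=
  if PySem.Str.len response ≤ max_chars then response
  else
    -- response.split('\n'): sep is non-empty, so split? is never none
    let lines := (PySem.Str.split? response "\n").getD []
    let kept := trimLoopA max_chars lines [] 0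
    let result := PySem.Str.join "\n" kept
    if PySem.Str.len result < PySem.Str.len response then
      result ++ "\n\n[Response trimmed for brevity.]"
    else result

-- ===== PORT B =====
def trim_response_alt (response : String) (max_chars : Int) : String :=
  if PySem.Str.len response ≤ max_chars then response
  else
    let cut := PySem.Str.rfindFrom response "\n" 0 (some (max (max_chars + 1) 0))
    let head := if cut ≥ 0 then PySem.Str.slice response none (some cut) else ""
    if PySem.Str.len head < PySem.Str.len response then
      head ++ "\n\n[Response trimmed for brevity.]"
    else head

-- ===== PRECONDITION & SPEC =====
def Spec_trim_response (response : String) (max_chars : Int) (out : String) : Prop := out = trim_response_alt response max_chars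
instance (response : String) (max_chars : Int) (out : String) : Decidable (Spec_trim_response response max_chars out) := by unfold Spec_trim_response; infer_instance

-- ===== CLAIM (what is proved, stated in full; the proofs are below) =====
def Claim_equal_trim_response : Prop := ∀ (response : String) (max_chars : Int), Dom_trim_response response max_chars → Spec_trim_response response max_chars (trim_response response max_chars)

-- ===== LEMMAS AND PROOFS =====

-- reference split on '\n' (list level)
def mySplit : List Char → List (List Char)
  | [] => [[]]
  | c :: cs => if c = '\n' then [] :: mySplit cs else (mySplit cs).modifyHead (c :: ·)

-- index of the last '\n' in a list, -1 if none
def lastNl : List Char → Int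
  | [] => -1
  | c :: cs =>
    let r := lastNl cs
    if r ≥ 0 then r + 1 else if c = '\n' then 0 else -1

-- A's loop, on the character-list level
def charsLoop (m : Int) : List (List Char) → List (List Char) → Int → List (List Char)
  | [], kept, _ => kept
  | l :: ls, kept, cc =>
    if cc + (l.length : Int) > m then kept
    else charsLoop m ls (kept ++ [l]) (cc + l.length + 1)

-- the prefix B keeps (list level)
def headB (cs : List Char) (m : Int) : List Char :=
  if lastNl (cs.take (max (m + 1) 0).toNat) ≥ 0
  then cs.take (lastNl (cs.take (max (m + 1) 0).toNat)).toNat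
  else []

theorem mySplit_ne_nil (cs : List Char) : mySplit cs ≠ [] := by
  induction cs with
  | nil => simp [mySplit]
  | cons c cs ih =>
    simp only [mySplit]
    split
    · simp
    · cases h : mySplit cs with
      | nil => exact absurd h ih
      | cons a as => simp

theorem mySplit_no_nl (l : List Char) (h : '\n' ∉ l) : mySplit l = [l] := by
  induction l with
  | nil => rfl
  | cons c cs ih =>
    simp only [List.mem_cons, not_or] at h
    have hc : ¬ c = '\n' := fun hh => h.1 hh.symm
    simp [mySplit, hc, ih h.2]

theorem mySplit_ctx (l rest : List Char) (h : '\n' ∉ l) :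
    mySplit (l ++ '\n' :: rest) = l :: mySplit rest := by
  induction l with
  | nil => simp [mySplit]
  | cons c cs ih =>
    simp only [List.mem_cons, not_or] at h
    have hc : ¬ c = '\n' := fun hh => h.1 hh.symm
    simp [mySplit, hc, ih h.2]

theorem splitOn_go_eq (fuel : Nat) (l cur : List Char) (acc : List (List Char))
    (h : l.length < fuel) :
    PySem.Chars.splitOn.go ['\n'] fuel l cur acc
      = acc.reverse ++ (mySplit l).modifyHead (cur.reverse ++ ·) := by
  induction l generalizing fuel cur acc with
  | nil =>
    cases fuel with
    | zero => omega
    | succ f => simp [PySem.Chars.splitOn.go, mySplit]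
  | cons c cs ih =>
    cases fuel with
    | zero => omega
    | succ f =>
      by_cases hc : c = '\n'
      · subst hc
        rw [show PySem.Chars.splitOn.go ['\n'] (f + 1) ('\n' :: cs) cur acc
              = PySem.Chars.splitOn.go ['\n'] f cs [] (cur.reverse :: acc) by
            simp [PySem.Chars.splitOn.go, List.isPrefixOf]]
        rw [ih f [] (cur.reverse :: acc) (by simpa using h)]
        simp only [mySplit, if_pos rfl, List.reverse_cons, List.reverse_nil,
          List.modifyHead_cons, List.nil_append, List.append_assoc,
          List.singleton_append]
        cases mySplit cs <;> simp
      · rw [show PySem.Chars.splitOn.go ['\n'] (f + 1) (c :: cs) cur acc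
              = PySem.Chars.splitOn.go ['\n'] f cs (c :: cur) acc by
            simp [PySem.Chars.splitOn.go, List.isPrefixOf, Ne.symm hc]]
        rw [ih f (c :: cur) acc (by simpa using h)]
        simp only [mySplit, if_neg hc]
        cases hms : mySplit cs with
        | nil => exact absurd hms (mySplit_ne_nil cs)
        | cons a as => simp

theorem splitOn_eq_mySplit (cs : List Char) :
    PySem.Chars.splitOn cs ['\n'] = mySplit cs := by
  rw [PySem.Chars.splitOn, splitOn_go_eq (cs.length + 1) cs [] [] (by omega)]
  cases h : mySplit cs with
  | nil => exact absurd h (mySplit_ne_nil cs)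
  | cons a as => simp

theorem lastNl_ge (cs : List Char) : -1 ≤ lastNl cs := by
  induction cs with
  | nil => simp [lastNl]
  | cons c cs ih =>
    simp only [lastNl]
    split <;> [omega; split <;> omega]

theorem lastNl_no_nl (cs : List Char) (h : '\n' ∉ cs) : lastNl cs = -1 := by
  induction cs with
  | nil => rfl
  | cons c cs ih =>
    simp only [List.mem_cons, not_or] at h
    have := lastNl_ge cs
    have hc : ¬ c = '\n' := fun hh => h.1 hh.symm
    simp [lastNl, ih h.2, hc]

theorem lastNl_ctx (l w : List Char) (h : '\n' ∉ l) :
    lastNl (l ++ '\n' :: w) = (l.length : Int) + 1 + lastNl w := by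
  induction l with
  | nil =>
    have := lastNl_ge w
    simp only [List.nil_append, lastNl, List.length_nil]
    split_ifs with h1 h2 <;> simp_all <;> omega
  | cons c cs ih =>
    simp only [List.mem_cons, not_or] at h
    have h2 := lastNl_ge w
    have h3 : (0:Int) ≤ (cs.length : Int) + 1 + lastNl w := by omega
    simp only [List.cons_append, lastNl, ih h.2, List.length_cons]
    rw [if_pos (by omega)]
    push_cast
    ring

theorem lastNl_append_singleton (u : List Char) (c : Char) :
    lastNl (u ++ [c]) = if c = '\n' then (u.length : Int) else lastNl u := by
  induction u with
  | nil => by_cases hc : c = '\n' <;> simp [lastNl, hc]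
  | cons a u ih =>
    have h1 := lastNl_ge u
    have h2 := lastNl_ge (u ++ [c])
    simp only [List.cons_append, lastNl, ih, List.length_cons]
    by_cases hc : c = '\n'
    · simp only [if_pos hc]
      rw [if_pos (by positivity)]
      push_cast; ring
    · simp [hc]

theorem rfind_go_eq (s : List Char) (k : Nat) :
    PySem.Chars.rfind.go s ['\n'] k = lastNl (s.take (k + 1)) := by
  induction k with
  | zero =>
    cases s with
    | nil => simp [PySem.Chars.rfind.go, List.isPrefixOf, lastNl]
    | cons c cs =>
      by_cases hc : c = '\n'
      · subst hc; simp [PySem.Chars.rfind.go, List.isPrefixOf, lastNl]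
      · have hc' : ¬ '\n' = c := fun hh => hc hh.symm
        simp [PySem.Chars.rfind.go, List.isPrefixOf, lastNl, hc, hc']
  | succ j ih =>
    have hstep : PySem.Chars.rfind.go s ['\n'] (j + 1)
        = if List.isPrefixOf ['\n'] (List.drop (j + 1) s) then ((j : Int) + 1)
          else PySem.Chars.rfind.go s ['\n'] j := by
      simp only [PySem.Chars.rfind.go]
      norm_num
    rw [hstep, ih]
    by_cases hlen : j + 1 < s.length
    · have hget : s.take (j + 2) = s.take (j + 1) ++ [s[j+1]] := by
        rw [List.take_succ, List.getElem?_eq_getElem hlen]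
        rfl
      have hdrop : List.drop (j + 1) s = s[j+1] :: List.drop (j + 2) s := by
        rw [List.drop_eq_getElem_cons hlen]
      rw [hget, lastNl_append_singleton, hdrop]
      have hlt : (List.take (j + 1) s).length = j + 1 := by
        simp [List.length_take]; omega
      by_cases hc : s[j+1] = '\n'
      · simp [List.isPrefixOf, hc, hlt]
      · have hc' : ¬ '\n' = s[j+1] := fun hh => hc hh.symm
        simp [List.isPrefixOf, hc, hc']
    · have h1 : List.drop (j + 1) s = [] := List.drop_eq_nil_of_le (by omega)
      have h2 : s.take (j + 2) = s.take (j + 1) := by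
        rw [List.take_of_length_le (by omega), List.take_of_length_le (by omega)]
      simp [h1, h2, List.isPrefixOf]

theorem rfind_eq_lastNl (s : List Char) : PySem.Chars.rfind s ['\n'] = lastNl s := by
  rw [PySem.Chars.rfind, rfind_go_eq, List.take_of_length_le (by omega)]

-- loop shift: running with accumulator kept and count cc = prefix kept, budget lowered
theorem charsLoop_shift (m : Int) (ls kept : List (List Char)) (cc : Int) :
    charsLoop m ls kept cc = kept ++ charsLoop (m - cc) ls [] 0 := by
  induction ls generalizing kept cc m with
  | nil => simp [charsLoop]
  | cons l ls ih =>
    simp only [charsLoop]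
    by_cases h : cc + (l.length : Int) > m
    · rw [if_pos h, if_pos (by omega), List.append_nil]
    · rw [if_neg h, if_neg (by omega), ih]
      conv_rhs => rw [ih]
      have harg : m - (cc + (l.length : Int) + 1) = m - cc - (0 + (l.length : Int) + 1) := by ring
      rw [harg]; simp

-- the head of dropWhile fails the predicate
theorem dropWhile_head_false {p : Char → Bool} :
    ∀ (cs : List Char) (c : Char) (rest : List Char),
      List.dropWhile p cs = c :: rest → p c = false := by
  intro cs
  induction cs with
  | nil => intro c rest h; simp [List.dropWhile] at h
  | cons a as ih =>
    intro c rest h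
    rw [List.dropWhile_cons] at h
    by_cases hp : p a
    · rw [if_pos hp] at h; exact ih _ _ h
    · rw [if_neg hp] at h
      cases h
      simpa using hp

theorem master_nonl (cs : List Char) (m : Int) (hm : m < (cs.length : Int))
    (hnl : '\n' ∉ cs) :
    PySem.Chars.join ['\n'] (charsLoop m (mySplit cs) [] 0) = headB cs m ∧
      (charsLoop m (mySplit cs) [] 0 = [] ↔
        lastNl (cs.take (max (m + 1) 0).toNat) = -1) := by
  have hwin : lastNl (cs.take (max (m + 1) 0).toNat) = -1 :=
    lastNl_no_nl _ (fun h => hnl (List.mem_of_mem_take h))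
  rw [mySplit_no_nl cs hnl]
  have hloop : charsLoop m [cs] [] 0 = [] := by
    simp only [charsLoop]
    rw [if_pos (by omega)]
  rw [hloop]
  refine ⟨?_, by simp [hwin]⟩
  simp [PySem.Chars.join, List.intercalate, headB, hwin]

theorem master (n : Nat) : ∀ (cs : List Char), cs.length ≤ n → ∀ (m : Int),
    m < (cs.length : Int) →
    PySem.Chars.join ['\n'] (charsLoop m (mySplit cs) [] 0) = headB cs m ∧
      (charsLoop m (mySplit cs) [] 0 = [] ↔
        lastNl (cs.take (max (m + 1) 0).toNat) = -1) := by
  induction n with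
  | zero =>
    intro cs hle m hm
    have : cs = [] := List.eq_nil_of_length_eq_zero (by omega)
    exact master_nonl cs m hm (by simp [this])
  | succ n ihn =>
    intro cs hle m hm
    have hl : '\n' ∉ cs.takeWhile (fun c => c != '\n') := by
      intro h
      have := List.mem_takeWhile_imp h
      simp at this
    have hcs : cs.takeWhile (fun c => c != '\n') ++ cs.dropWhile (fun c => c != '\n') = cs :=
      List.takeWhile_append_dropWhile
    cases hd : cs.dropWhile (fun c => c != '\n') with
    | nil =>
      exact master_nonl cs m hm (by rw [← hcs, hd]; simpa using hl)
    | cons c rest =>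
      set l := cs.takeWhile (fun c => c != '\n') with hldef
      have hc : c = '\n' := by
        have := dropWhile_head_false cs c rest hd
        simpa using this
      subst hc
      have hcs2 : cs = l ++ '\n' :: rest := by rw [← hcs, hd]
      have hsplit : mySplit cs = l :: mySplit rest := by
        rw [hcs2]; exact mySplit_ctx l rest hl
      have hlencs : cs.length = l.length + 1 + rest.length := by
        rw [hcs2]; simp; omega
      by_cases hkeep : (0:Int) + (l.length : Int) > m
      · -- first line does not fit: loop keeps nothing, window has no newline
        have hloop : charsLoop m (mySplit cs) [] 0 = [] := by
          rw [hsplit]; simp only [charsLoop]; rw [if_pos hkeep]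
        have hkN : (max (m + 1) 0).toNat ≤ l.length := by omega
        have hwin0 : cs.take (max (m + 1) 0).toNat = l.take (max (m + 1) 0).toNat := by
          rw [hcs2]; exact List.take_append_of_le_length hkN
        have hwin : lastNl (cs.take (max (m + 1) 0).toNat) = -1 := by
          rw [hwin0]
          exact lastNl_no_nl _ (fun h => hl (List.mem_of_mem_take h))
        rw [hloop]
        refine ⟨?_, by simp [hwin]⟩
        simp [PySem.Chars.join, List.intercalate, headB, hwin]
      · -- first line fits: keep it and recurse on the rest with the reduced budget
        have hloop : charsLoop m (mySplit cs) [] 0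
            = l :: charsLoop (m - (l.length : Int) - 1) (mySplit rest) [] 0 := by
          rw [hsplit]
          simp only [charsLoop]
          rw [if_neg hkeep, charsLoop_shift]
          rw [show m - (0 + (l.length : Int) + 1) = m - (l.length : Int) - 1 by ring]
          simp
        set m' := m - (l.length : Int) - 1 with hm'def
        have hrest : m' < (rest.length : Int) := by
          have h2 := hm
          rw [hlencs] at h2; push_cast at h2; omega
        obtain ⟨IH1, IH2⟩ := ihn rest (by omega) m' hrest
        have hmax' : max (m' + 1) 0 = m' + 1 := by omega
        rw [hmax'] at IH2
        have hmax : max (m + 1) 0 = m + 1 := by omega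
        have hwin0 : cs.take (max (m + 1) 0).toNat
            = l ++ '\n' :: rest.take (m' + 1).toNat := by
          rw [hcs2, hmax]
          rw [show (m + 1).toNat = l.length + (1 + (m' + 1).toNat) by omega]
          rw [List.take_length_add_append]
          rw [show 1 + (m' + 1).toNat = (m' + 1).toNat + 1 by omega, List.take_succ_cons]
        have hwin : lastNl (cs.take (max (m + 1) 0).toNat)
            = (l.length : Int) + 1 + lastNl (rest.take (m' + 1).toNat) := by
          rw [hwin0]; exact lastNl_ctx _ _ hl
        set t := lastNl (rest.take (m' + 1).toNat) with ht
        have hge := lastNl_ge (rest.take (m' + 1).toNat)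
        rw [← ht] at hge
        by_cases hw : t = -1
        · -- nothing more fits: kept = [l], B cuts at the newline after l
          have hK : charsLoop m' (mySplit rest) [] 0 = [] := IH2.mpr hw
          rw [hloop, hK]
          constructor
          · rw [PySem.Chars.join_singleton]
            simp only [headB]
            rw [hwin, hw, if_pos (by omega)]
            rw [show ((l.length : Int) + 1 + -1).toNat = l.length by omega]
            rw [hcs2, List.take_append_of_le_length (le_refl _), List.take_length]
          · refine ⟨fun h => absurd h (by simp), fun h => absurd h ?_⟩
            rw [hwin, hw]
            intro hcon
            omega
        · -- more lines fit: peel l ++ '\n' off both sides and use the IH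
          have hKne : charsLoop m' (mySplit rest) [] 0 ≠ [] := fun h => hw (IH2.mp h)
          rw [hloop]
          constructor
          · cases hK : charsLoop m' (mySplit rest) [] 0 with
            | nil => exact absurd hK hKne
            | cons q qs =>
              rw [PySem.Chars.join_cons_cons, ← hK, IH1]
              have hBrest : headB rest m' = rest.take t.toNat := by
                simp only [headB, hmax', ← ht]
                rw [if_pos (by omega)]
              rw [hBrest]
              simp only [headB]
              rw [hwin, if_pos (by omega)]
              rw [show ((l.length : Int) + 1 + t).toNat = l.length + (1 + t.toNat) by omega]
              rw [hcs2, List.take_length_add_append]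
              rw [show 1 + t.toNat = t.toNat + 1 by omega, List.take_succ_cons]
              simp
          · refine ⟨fun h => absurd h (by simp), fun h => absurd h ?_⟩
            rw [hwin]
            intro hcon
            omega

-- ===== bridges between the String ports and the list-level proof =====

theorem loop_bridge (m : Int) :
    ∀ (ls kept : List String) (cc : Int),
      (trimLoopA m ls kept cc).map String.toList
        = charsLoop m (ls.map String.toList) (kept.map String.toList) cc := by
  intro ls
  induction ls with
  | nil => intro kept cc; simp [trimLoopA, charsLoop]
  | cons line ls ih =>
    intro kept cc
    simp only [trimLoopA, charsLoop, List.map_cons, PySem.Str.len_eq]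
    split
    · rfl
    · rw [ih]
      simp

theorem rfindFrom_window (cs : List Char) (e : Int) (he : 0 ≤ e) :
    PySem.Chars.rfindFrom cs ['\n'] 0 (some e) = lastNl (cs.take e.toNat) := by
  simp only [PySem.Chars.rfindFrom]
  norm_num
  have hn : (0:Int) ≤ (cs.length : Int) := by positivity
  by_cases hlt : (cs.length : Int) < e
  · rw [if_pos hlt]
    rw [List.take_of_length_le (by simp), rfind_eq_lastNl]
    rw [List.take_of_length_le (by omega)]
    have := lastNl_ge cs
    split <;> omega
  · rw [if_neg hlt]
    rw [rfind_eq_lastNl]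
    have := lastNl_ge (cs.take e.toNat)
    split <;> omega

theorem split_bridge (response : String) :
    ((PySem.Str.split? response "\n").getD []).map String.toList
      = mySplit response.toList := by
  have hb := PySem.Str.split?_map response "\n"
  have hc : PySem.Chars.split? response.toList "\n".toList
      = some (mySplit response.toList) := by
    rw [show "\n".toList = ['\n'] from rfl, PySem.Chars.split?, if_neg (by simp),
      splitOn_eq_mySplit]
  rw [hc] at hb
  cases hx : PySem.Str.split? response "\n" with
  | none => rw [hx] at hb; simp at hb
  | some L => rw [hx] at hb; simpa using hb

theorem main_eq (response : String) (m : Int) :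
    trim_response response m = trim_response_alt response m := by
  unfold trim_response trim_response_alt
  by_cases h : PySem.Str.len response ≤ m
  · rw [if_pos h, if_pos h]
  · rw [if_neg h, if_neg h]
    simp only []
    have hm : m < (response.toList.length : Int) := by
      rw [PySem.Str.len_eq] at h; omega
    have hres : (PySem.Str.join "\n"
        (trimLoopA m ((PySem.Str.split? response "\n").getD []) [] 0)).toList
        = headB response.toList m := by
      rw [PySem.Str.toList_join, loop_bridge, split_bridge]
      rw [show "\n".toList = ['\n'] from rfl]
      exact (master response.toList.length response.toList le_rfl m hm).1
    have hcut : PySem.Str.rfindFrom response "\n" 0 (some (max (m + 1) 0))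
        = lastNl (response.toList.take (max (m + 1) 0).toNat) := by
      rw [PySem.Str.rfindFrom_eq, show "\n".toList = ['\n'] from rfl]
      exact rfindFrom_window _ _ (by omega)
    have hhead : (if PySem.Str.rfindFrom response "\n" 0 (some (max (m + 1) 0)) ≥ 0
        then PySem.Str.slice response none (some (PySem.Str.rfindFrom response "\n" 0 (some (max (m + 1) 0))))
        else "").toList = headB response.toList m := by
      rw [hcut, headB]
      split
      · rename_i hge
        rw [PySem.Str.toList_slice, PySem.Chars.slice_eq_listSlice]
        exact PySem.List.slice_to _ hge
      · rfl
    have hRH : PySem.Str.join "\n"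
        (trimLoopA m ((PySem.Str.split? response "\n").getD []) [] 0)
        = (if PySem.Str.rfindFrom response "\n" 0 (some (max (m + 1) 0)) ≥ 0
          then PySem.Str.slice response none (some (PySem.Str.rfindFrom response "\n" 0 (some (max (m + 1) 0))))
          else "") :=
      String.toList_inj.mp (by rw [hres, hhead])
    rw [hRH]

-- ===== VERDICT (by name: the statement is the Claim_ definition above) =====
theorem trim_response_spec : Claim_equal_trim_response := by
  intro response max_chars _
  unfold Spec_trim_response
  exact main_eq response max_chars
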